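-- pv_equiv track=rewrite | github.com/IBM/cp4waiops-samples | connector-scripts/instana_api_load_calculator.py | generate_integrations_group
-- ===== SOURCE A (Python) =====
-- from collections import defaultdict
-- from math import ceil
--
-- polling_interval_minutes = 5
--
-- BATCH_SIZE = 30
--
-- def estimate_hourly_requests(num_snapshots, num_metrics):
--         return ceil(num_snapshots / BATCH_SIZE) * ceil(num_metrics / 5) * ceil(60 / polling_interval_minutes)
--
-- def generate_integrations_group(plugin_snapshot_map, metrics_config, max_requests):
--     plugin_chunks = []
--     for entry in metrics_config:
--         for plugin, metrics in entry.items():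
--             if plugin not in plugin_snapshot_map:
--                 continue
--             snapshots = plugin_snapshot_map[plugin]
--             for i in range(0, len(metrics), 5):
--                 chunk = metrics[i:i+5]
--                 req_count = estimate_hourly_requests(len(snapshots), len(chunk))
--                 plugin_chunks.append({
--                     "plugin": plugin,
--                     "snapshots": snapshots,
--                     "metrics": chunk,
--                     "requests": req_count
--                 })
--     plugin_chunks.sort(key=lambda x: x["requests"], reverse=True)
--
--     bins = []
--     bin_usage = []
--     for chunk in plugin_chunks:
--         placed = False
--         for i, total in enumerate(bin_usage):
--             if total + chunk["requests"] <= max_requests: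
--                 bins[i].append(chunk)
--                 bin_usage[i] += chunk["requests"]
--                 placed = True
--                 break
--         if not placed:
--             bins.append([chunk])
--             bin_usage.append(chunk["requests"])
--
--     integration_groups = []
--     for bin_chunks in bins:
--         integration = defaultdict(lambda: {"metrics": [], "snapshots": []})
--         for chunk in bin_chunks:
--             plugin = chunk["plugin"]
--             integration[plugin]["metrics"].extend(chunk["metrics"])
--             integration[plugin]["snapshots"] = chunk["snapshots"]
--         integration_groups.append(integration)
--     return integration_groups
-- ===== SOURCE B (Python) =====
-- NEG = -(1 << 62)
--
--
-- def _build(k):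
--     # perfect segment tree of height k: leaf = (maxval,), node = (maxval, left, right)
--     if k == 0:
--         return (NEG,)
--     sub = _build(k - 1)
--     return (NEG, sub, sub)
--
--
-- def _query(t, k, req):
--     # leftmost leaf index whose value is >= req, or None
--     if k == 0:
--         return 0 if t[0] >= req else None
--     if t[1][0] >= req:
--         return _query(t[1], k - 1, req)
--     res = _query(t[2], k - 1, req)
--     return None if res is None else res + (1 << (k - 1))
--
--
-- def _update(t, k, i, v):
--     if k == 0:
--         return (v,)
--     half = 1 << (k - 1)
--     if i < half:
--         l = _update(t[1], k - 1, i, v)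
--         return (max(l[0], t[2][0]), l, t[2])
--     r = _update(t[2], k - 1, i - half, v)
--     return (max(t[1][0], r[0]), t[1], r)
--
--
-- def generate_integrations_group(plugin_snapshot_map, metrics_config, max_requests):
--     # 1. collect chunks as tuples; every chunk holds 1..5 metrics, so its hourly
--     #    request estimate collapses to the closed form 12 * ceil(len(snaps)/30).
--     chunks = []
--     for entry in metrics_config:
--         for plugin, metrics in entry.items():
--             if plugin not in plugin_snapshot_map:
--                 continue
--             snaps = plugin_snapshot_map[plugin]
--             req = 12 * ((len(snaps) + 29) // 30)
--             for i in range(0, len(metrics), 5):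
--                 chunks.append((plugin, snaps, metrics[i:i + 5], req))
--
--     # 2. stable decreasing order by request count (negated-key ascending sort)
--     chunks = sorted(chunks, key=lambda c: -c[3])
--
--     # 3. first-fit via a segment tree of remaining capacities: the leftmost bin
--     #    that still fits req is found by descending the max-tree in O(log n);
--     #    unopened slots hold NEG < 0 <= req so they are never selected.
--     k = 0
--     while (1 << k) < len(chunks):
--         k += 1
--     tree = _build(k)
--     rem = []        # remaining capacity of each opened bin
--     assign = []     # bin index of each chunk, in chunk order
--     for c in chunks:
--         req = c[3]
--         j = _query(tree, k, req)
--         if j is None: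
--             j = len(rem)
--             rem.append(max_requests - req)
--         else:
--             rem[j] -= req
--         tree = _update(tree, k, j, rem[j])
--         assign.append(j)
--
--     # 4. build the integration groups in one pass over (chunk, bin index)
--     groups = []
--     for (plugin, snaps, ms, _), j in zip(chunks, assign):
--         if j == len(groups):
--             groups.append({})
--         g = groups[j]
--         if plugin in g:
--             g[plugin] = (g[plugin][0] + ms, snaps)
--         else:
--             g[plugin] = (list(ms), snaps)
--     return [{p: {"metrics": m, "snapshots": s} for p, (m, s) in g.items()}
--             for g in groups]
-- ===== Notes on version B (the rewrite author's own statement) =====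
-- stated objective: alternative
-- what changed: B replaces A's linear scan over all bins per chunk in first-fit bin packing by a max-segment tree over remaining bin capacities (the leftmost fitting bin is found by descending the tree), computes each chunk's request estimate in the closed form 12*ceil(len(snaps)/30) (every chunk holds 1-5 metrics), records bin indices instead of mutating bin lists, and builds the integration groups in one pass over (chunk, bin index) pairs instead of a second nested loop over bins.
import Mathlib
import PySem

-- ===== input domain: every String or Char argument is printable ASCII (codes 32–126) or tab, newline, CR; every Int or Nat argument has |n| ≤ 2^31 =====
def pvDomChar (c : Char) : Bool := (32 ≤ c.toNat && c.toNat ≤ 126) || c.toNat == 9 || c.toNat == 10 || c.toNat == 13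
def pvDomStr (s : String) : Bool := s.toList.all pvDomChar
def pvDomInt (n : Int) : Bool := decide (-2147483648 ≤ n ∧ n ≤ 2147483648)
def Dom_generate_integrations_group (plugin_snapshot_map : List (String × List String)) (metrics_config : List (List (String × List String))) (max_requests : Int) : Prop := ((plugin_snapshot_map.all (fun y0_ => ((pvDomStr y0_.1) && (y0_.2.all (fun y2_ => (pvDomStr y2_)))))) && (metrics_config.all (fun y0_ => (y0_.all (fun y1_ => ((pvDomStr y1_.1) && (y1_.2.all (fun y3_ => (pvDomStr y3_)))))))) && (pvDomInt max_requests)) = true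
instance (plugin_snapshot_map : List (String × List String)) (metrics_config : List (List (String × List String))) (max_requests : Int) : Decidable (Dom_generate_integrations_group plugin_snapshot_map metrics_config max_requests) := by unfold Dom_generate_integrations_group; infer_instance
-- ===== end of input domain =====

-- B replaces A's linear first-fit scan over all bins by a max-segment-tree over
-- remaining bin capacities (leftmost fitting bin found by descending the tree),
-- computes each chunk's request count in closed form, and builds the groups in
-- one pass over (chunk, bin index) pairs instead of a second nested loop.

-- a chunk record: A's dict with the fixed keys "plugin"/"snapshots"/"metrics"/"requests"
structure PVChunk where
  plugin : String
  snapshots : List String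
  metrics : List String
  requests : Int
deriving DecidableEq, Repr

-- xs[i] = f(xs[i]) at a (known in-range) index, used for bins[i].append / bin_usage[i] +=
def pvUpdateAt {α : Type} : List α → Nat → (α → α) → List α
  | [], _, _ => []
  | x :: xs, 0, f => f x :: xs
  | x :: xs, n + 1, f => x :: pvUpdateAt xs n f

-- ===== PORT A =====
-- ceil(x/k) on nonnegative ints, written as (x+k-1)//k; exact here: the Python divides
-- nonnegative list lengths (< 2^53) where float division/ceil is exact at the boundaries
def estimate_hourly_requests (num_snapshots num_metrics : Int) : Int :=
  PySem.Int.floordiv (num_snapshots + 29) 30 * PySem.Int.floordiv (num_metrics + 4) 5 * 12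

-- 'for i, total in enumerate(bin_usage): if total + r <= max: … break' — first fitting index
def pvFindBin (usage : List Int) (r maxr : Int) : Option Nat :=
  match usage with
  | [] => none
  | t :: rest => if t + r ≤ maxr then some 0 else (pvFindBin rest r maxr).map (· + 1)

def generate_integrations_group (plugin_snapshot_map : List (String × List String)) (metrics_config : List (List (String × List String))) (max_requests : Int) : List (List (String × List (String × List String))) :=
  let plugin_chunks : List PVChunk := metrics_config.foldl (fun acc entry =>
    entry.foldl (fun acc pm =>
      match PySem.Dict.get? (PySem.Dict.mk plugin_snapshot_map) pm.1 with
      | none => acc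
      | some snapshots =>
        (PySem.List.pyRange 0 (PySem.List.len pm.2) 5).foldl (fun acc i =>
          let chunk := PySem.List.slice pm.2 (some i) (some (i + 5))
          let req := estimate_hourly_requests (PySem.List.len snapshots) (PySem.List.len chunk)
          acc ++ [⟨pm.1, snapshots, chunk, req⟩]) acc) acc) []
  let sortedChunks := PySem.List.sorted plugin_chunks (fun c => c.requests) true
  let st := sortedChunks.foldl (fun (st : List (List PVChunk) × List Int) c =>
    match pvFindBin st.2 c.requests max_requests with
    | some i => (pvUpdateAt st.1 i (· ++ [c]), pvUpdateAt st.2 i (· + c.requests))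
    | none => (st.1 ++ [[c]], st.2 ++ [c.requests])) ([], [])
  st.1.foldl (fun gs bin_chunks =>
    let integration := bin_chunks.foldl (fun (d : PySem.Dict String (PySem.Dict String (List String))) c =>
      let inner := PySem.Dict.getD d c.plugin (PySem.Dict.mk [("metrics", []), ("snapshots", [])])
      let inner := PySem.Dict.modify inner "metrics" [] (· ++ c.metrics)
      let inner := PySem.Dict.insert inner "snapshots" c.snapshots
      PySem.Dict.insert d c.plugin inner) PySem.Dict.empty
    gs ++ [integration.items.map (fun p => (p.1, p.2.items))]) []

-- ===== PORT B =====

-- NEG = -(1 << 62): sentinel capacity of a not-yet-opened bin slot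
-- perfect max-segment tree of height k over 2^k capacity slots:
-- tuple (v,) = leaf, tuple (mx, l, r) = node (mx = max of the subtree's leaves)
inductive PVSeg where
  | leaf : Int → PVSeg
  | node : Int → PVSeg → PVSeg → PVSeg
deriving DecidableEq, Repr

-- t[0]: the root max of a subtree
def pvTop : PVSeg → Int
  | .leaf v => v
  | .node m _ _ => m

-- _build(k)
def pvBuild : Nat → PVSeg
  | 0 => .leaf (-(2^62))
  | k + 1 => let sub := pvBuild k; .node (-(2^62)) sub sub

-- _query(t, k, req): leftmost leaf index with value >= req, or None
def pvQuery : PVSeg → Nat → Int → Option Nat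
  | .leaf v, _, req => if req ≤ v then some 0 else none
  | .node _ l r, k, req =>
      if req ≤ pvTop l then pvQuery l (k - 1) req
      else (pvQuery r (k - 1) req).map (· + 2 ^ (k - 1))

-- _update(t, k, i, v)
def pvUpdate : PVSeg → Nat → Nat → Int → PVSeg
  | .leaf _, _, _, v => .leaf v
  | .node _ l r, k, i, v =>
      if i < 2 ^ (k - 1) then
        let l' := pvUpdate l (k - 1) i v
        .node (max (pvTop l') (pvTop r)) l' r
      else
        let r' := pvUpdate r (k - 1) (i - 2 ^ (k - 1)) v
        .node (max (pvTop l) (pvTop r')) l r'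

-- 'k = 0; while (1 << k) < n: k += 1'
def pvKAux (n k : Nat) : Nat :=
  if 2 ^ k < n then pvKAux n (k + 1) else k
termination_by n - 2 ^ k
decreasing_by
  have h2 : 2 ^ k < 2 ^ (k + 1) := Nat.pow_lt_pow_right (by norm_num) (Nat.lt_succ_self k)
  omega

def generate_integrations_group_alt (plugin_snapshot_map : List (String × List String)) (metrics_config : List (List (String × List String))) (max_requests : Int) : List (List (String × List (String × List String))) :=
  let chunks : List PVChunk := metrics_config.foldl (fun acc entry =>
    entry.foldl (fun acc pm =>
      match PySem.Dict.get? (PySem.Dict.mk plugin_snapshot_map) pm.1 with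
      | none => acc
      | some snaps =>
        let req := 12 * PySem.Int.floordiv (PySem.List.len snaps + 29) 30
        (PySem.List.pyRange 0 (PySem.List.len pm.2) 5).foldl (fun acc i =>
          acc ++ [⟨pm.1, snaps, PySem.List.slice pm.2 (some i) (some (i + 5)), req⟩]) acc) acc) []
  let chunks := PySem.List.sorted chunks (fun c => -c.requests) false
  let k := pvKAux chunks.length 0
  -- rem[j] reads in Source B always have j < len(rem) (proved below); getD is exact there
  let st := chunks.foldl (fun (st : PVSeg × List Int × List Nat) c =>
    match pvQuery st.1 k c.requests with
    | none =>
        let j := st.2.1.length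
        let rem := st.2.1 ++ [max_requests - c.requests]
        (pvUpdate st.1 k j (rem.getD j 0), rem, st.2.2 ++ [j])
    | some j =>
        let rem := st.2.1.set j (st.2.1.getD j 0 - c.requests)
        (pvUpdate st.1 k j (rem.getD j 0), rem, st.2.2 ++ [j])) (pvBuild k, [], [])
  let groups := (chunks.zip st.2.2).foldl (fun (groups : List (PySem.Dict String (List String × List String))) cj =>
    let groups := if cj.2 = groups.length then groups ++ [PySem.Dict.empty] else groups
    pvUpdateAt groups cj.2 (fun g =>
      match PySem.Dict.get? g cj.1.plugin with
      | some mv => PySem.Dict.insert g cj.1.plugin (mv.1 ++ cj.1.metrics, cj.1.snapshots)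
      | none => PySem.Dict.insert g cj.1.plugin (cj.1.metrics, cj.1.snapshots))) []
  groups.map (fun g => g.items.map (fun p => (p.1, [("metrics", p.2.1), ("snapshots", p.2.2)])))

-- ===== PRECONDITION & SPEC =====
def Spec_generate_integrations_group (plugin_snapshot_map : List (String × List String)) (metrics_config : List (List (String × List String))) (max_requests : Int) (out : List (List (String × List (String × List String)))) : Prop := out = generate_integrations_group_alt plugin_snapshot_map metrics_config max_requests
instance (plugin_snapshot_map : List (String × List String)) (metrics_config : List (List (String × List String))) (max_requests : Int) (out : List (List (String × List (String × List String)))) : Decidable (Spec_generate_integrations_group plugin_snapshot_map metrics_config max_requests out) := by unfold Spec_generate_integrations_group; infer_instance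

-- ===== CLAIM (what is proved, stated in full; the proofs are below) =====
def Claim_equal_generate_integrations_group : Prop := ∀ (plugin_snapshot_map : List (String × List String)) (metrics_config : List (List (String × List String))) (max_requests : Int), Dom_generate_integrations_group plugin_snapshot_map metrics_config max_requests → Spec_generate_integrations_group plugin_snapshot_map metrics_config max_requests (generate_integrations_group plugin_snapshot_map metrics_config max_requests)

-- ===== LEMMAS AND PROOFS =====

-- proof-side names for the pipeline pieces of the two ports (definitionally equal to them)

def pvChunksA (plugin_snapshot_map : List (String × List String)) (metrics_config : List (List (String × List String))) : List PVChunk :=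
  metrics_config.foldl (fun acc entry =>
    entry.foldl (fun acc pm =>
      match PySem.Dict.get? (PySem.Dict.mk plugin_snapshot_map) pm.1 with
      | none => acc
      | some snapshots =>
        (PySem.List.pyRange 0 (PySem.List.len pm.2) 5).foldl (fun acc i =>
          acc ++ [⟨pm.1, snapshots, PySem.List.slice pm.2 (some i) (some (i + 5)),
            estimate_hourly_requests (PySem.List.len snapshots)
              (PySem.List.len (PySem.List.slice pm.2 (some i) (some (i + 5))))⟩]) acc) acc) []

def pvChunksB (plugin_snapshot_map : List (String × List String)) (metrics_config : List (List (String × List String))) : List PVChunk :=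
  metrics_config.foldl (fun acc entry =>
    entry.foldl (fun acc pm =>
      match PySem.Dict.get? (PySem.Dict.mk plugin_snapshot_map) pm.1 with
      | none => acc
      | some snaps =>
        let req := 12 * PySem.Int.floordiv (PySem.List.len snaps + 29) 30
        (PySem.List.pyRange 0 (PySem.List.len pm.2) 5).foldl (fun acc i =>
          acc ++ [⟨pm.1, snaps, PySem.List.slice pm.2 (some i) (some (i + 5)), req⟩]) acc) acc) []

def pvFA (maxr : Int) (st : List (List PVChunk) × List Int) (c : PVChunk) : List (List PVChunk) × List Int :=
  match pvFindBin st.2 c.requests maxr with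
  | some i => (pvUpdateAt st.1 i (· ++ [c]), pvUpdateAt st.2 i (· + c.requests))
  | none => (st.1 ++ [[c]], st.2 ++ [c.requests])

def pvFB (maxr : Int) (k : Nat) (st : PVSeg × List Int × List Nat) (c : PVChunk) : PVSeg × List Int × List Nat :=
  match pvQuery st.1 k c.requests with
  | none =>
      let j := st.2.1.length
      let rem := st.2.1 ++ [maxr - c.requests]
      (pvUpdate st.1 k j (rem.getD j 0), rem, st.2.2 ++ [j])
  | some j =>
      let rem := st.2.1.set j (st.2.1.getD j 0 - c.requests)
      (pvUpdate st.1 k j (rem.getD j 0), rem, st.2.2 ++ [j])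

def pvStepA3 (d : PySem.Dict String (PySem.Dict String (List String))) (c : PVChunk) : PySem.Dict String (PySem.Dict String (List String)) :=
  let inner := PySem.Dict.getD d c.plugin (PySem.Dict.mk [("metrics", []), ("snapshots", [])])
  let inner := PySem.Dict.modify inner "metrics" [] (· ++ c.metrics)
  let inner := PySem.Dict.insert inner "snapshots" c.snapshots
  PySem.Dict.insert d c.plugin inner

def pvGroupA (bin : List PVChunk) : PySem.Dict String (PySem.Dict String (List String)) :=
  bin.foldl pvStepA3 PySem.Dict.empty

def pvStepB3 (g : PySem.Dict String (List String × List String)) (c : PVChunk) : PySem.Dict String (List String × List String) :=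
  match PySem.Dict.get? g c.plugin with
  | some mv => PySem.Dict.insert g c.plugin (mv.1 ++ c.metrics, c.snapshots)
  | none => PySem.Dict.insert g c.plugin (c.metrics, c.snapshots)

def pvGroupB (bin : List PVChunk) : PySem.Dict String (List String × List String) :=
  bin.foldl pvStepB3 PySem.Dict.empty

def pvG (groups : List (PySem.Dict String (List String × List String))) (cj : PVChunk × Nat) : List (PySem.Dict String (List String × List String)) :=
  let groups := if cj.2 = groups.length then groups ++ [PySem.Dict.empty] else groups
  pvUpdateAt groups cj.2 (fun g =>
    match PySem.Dict.get? g cj.1.plugin with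
    | some mv => PySem.Dict.insert g cj.1.plugin (mv.1 ++ cj.1.metrics, cj.1.snapshots)
    | none => PySem.Dict.insert g cj.1.plugin (cj.1.metrics, cj.1.snapshots))

def pvReplay : List (PVChunk × Nat) → List (List PVChunk) → List (List PVChunk)
  | [], bins => bins
  | (c, j) :: rest, bins =>
      pvReplay rest (if j = bins.length then bins ++ [[c]] else pvUpdateAt bins j (· ++ [c]))

def pvConv (d : PySem.Dict String (List String × List String)) : PySem.Dict String (PySem.Dict String (List String)) :=
  PySem.Dict.mk (d.items.map (fun p => (p.1, PySem.Dict.mk [("metrics", p.2.1), ("snapshots", p.2.2)])))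

lemma portA_unfold (psm : List (String × List String)) (mc : List (List (String × List String))) (maxr : Int) :
    generate_integrations_group psm mc maxr =
      (((PySem.List.sorted (pvChunksA psm mc) (fun c => c.requests) true).foldl (pvFA maxr) ([], [])).1).foldl
        (fun gs bin => gs ++ [(pvGroupA bin).items.map (fun p => (p.1, p.2.items))]) [] := rfl

lemma portB_unfold (psm : List (String × List String)) (mc : List (List (String × List String))) (maxr : Int) :
    generate_integrations_group_alt psm mc maxr =
      (((PySem.List.sorted (pvChunksB psm mc) (fun c => -c.requests) false).zip
          (((PySem.List.sorted (pvChunksB psm mc) (fun c => -c.requests) false).foldl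
              (pvFB maxr (pvKAux (PySem.List.sorted (pvChunksB psm mc) (fun c => -c.requests) false).length 0))
              (pvBuild (pvKAux (PySem.List.sorted (pvChunksB psm mc) (fun c => -c.requests) false).length 0), [], [])).2.2)).foldl pvG []).map
        (fun g => g.items.map (fun p => (p.1, [("metrics", p.2.1), ("snapshots", p.2.2)]))) := rfl

-- ===== pvUpdateAt facts =====

lemma pvUpdateAt_length {α : Type} (l : List α) (n : Nat) (f : α → α) :
    (pvUpdateAt l n f).length = l.length := by
  induction l generalizing n with
  | nil => rfl
  | cons x xs ih => cases n <;> simp [pvUpdateAt, ih]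

lemma pvUpdateAt_append_length {α : Type} (l : List α) (x : α) (f : α → α) :
    pvUpdateAt (l ++ [x]) l.length f = l ++ [f x] := by
  induction l with
  | nil => rfl
  | cons y ys ih => simpa [pvUpdateAt] using ih

lemma pvUpdateAt_map {α β : Type} (g : α → β) (l : List α) (n : Nat) (F : β → β) (G : α → α)
    (h : ∀ x, F (g x) = g (G x)) :
    pvUpdateAt (l.map g) n F = (pvUpdateAt l n G).map g := by
  induction l generalizing n with
  | nil => rfl
  | cons x xs ih => cases n <;> simp [pvUpdateAt, h, ih]

-- ===== pvFindBin facts =====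

lemma pvFindBin_some_lt (usage : List Int) (r m : Int) (i : Nat)
    (h : pvFindBin usage r m = some i) : i < usage.length := by
  induction usage generalizing i with
  | nil => simp [pvFindBin] at h
  | cons t rest ih =>
    by_cases hfit : t + r ≤ m
    · simp [pvFindBin, hfit] at h
      simp [← h]
    · simp [pvFindBin, hfit] at h
      obtain ⟨i', hi', rfl⟩ := h
      have := ih i' hi'
      simpa using Nat.succ_lt_succ this

lemma pvFindBin_eq_findIdx (usage : List Int) (r m : Int) :
    pvFindBin usage r m = (usage.map (fun u => m - u)).findIdx? (fun x => r ≤ x) := by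
  induction usage with
  | nil => simp [pvFindBin]
  | cons t rest ih =>
    simp only [List.map_cons, List.findIdx?_cons]
    by_cases hfit : t + r ≤ m
    · rw [if_pos (by simp; omega)]
      simp [pvFindBin, hfit]
    · rw [if_neg (by simp; omega)]
      simp only [pvFindBin, if_neg hfit, ih]

-- ===== segment tree facts =====

def pvLeaves : PVSeg → List Int
  | .leaf v => [v]
  | .node _ l r => pvLeaves l ++ pvLeaves r

-- well-formedness: the tree is perfect of height k and every node's value is its subtree max
def pvOk : Nat → PVSeg → Prop
  | 0, .leaf _ => True
  | k + 1, .node m l r => pvOk k l ∧ pvOk k r ∧ m = max (pvTop l) (pvTop r)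
  | _, _ => False

lemma pvOk_leaves_length : ∀ (t : PVSeg) (k : Nat), pvOk k t → (pvLeaves t).length = 2 ^ k := by
  intro t
  induction t with
  | leaf v =>
    intro k h
    cases k with
    | zero => simp [pvLeaves]
    | succ k => exact absurd h (by simp [pvOk])
  | node m l r ihl ihr =>
    intro k h
    cases k with
    | zero => exact absurd h (by simp [pvOk])
    | succ k =>
      simp only [pvOk] at h
      obtain ⟨hl, hr, -⟩ := h
      simp only [pvLeaves, List.length_append, ihl k hl, ihr k hr]
      rw [pow_succ]
      ring

lemma pvOk_le_top : ∀ (t : PVSeg) (k : Nat), pvOk k t → ∀ x ∈ pvLeaves t, x ≤ pvTop t := by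
  intro t
  induction t with
  | leaf v =>
    intro k _ x hx
    simp [pvLeaves] at hx
    simp [pvTop, hx]
  | node m l r ihl ihr =>
    intro k h x hx
    cases k with
    | zero => exact absurd h (by simp [pvOk])
    | succ k =>
      simp only [pvOk] at h
      obtain ⟨hl, hr, hm⟩ := h
      simp only [pvTop, hm]
      rcases List.mem_append.mp (by simpa [pvLeaves] using hx) with h | h
      · exact le_trans (ihl k hl x h) (le_max_left _ _)
      · exact le_trans (ihr k hr x h) (le_max_right _ _)

lemma pvOk_top_mem : ∀ (t : PVSeg) (k : Nat), pvOk k t → pvTop t ∈ pvLeaves t := by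
  intro t
  induction t with
  | leaf v => intro k _; simp [pvLeaves, pvTop]
  | node m l r ihl ihr =>
    intro k h
    cases k with
    | zero => exact absurd h (by simp [pvOk])
    | succ k =>
      simp only [pvOk] at h
      obtain ⟨hl, hr, hm⟩ := h
      simp only [pvTop, hm, pvLeaves, List.mem_append]
      rcases max_choice (pvTop l) (pvTop r) with h | h
      · exact Or.inl (h ▸ ihl k hl)
      · exact Or.inr (h ▸ ihr k hr)

lemma pvTop_build (k : Nat) : pvTop (pvBuild k) = -(2 ^ 62) := by
  cases k <;> rfl

lemma pvBuild_ok (k : Nat) : pvOk k (pvBuild k) := by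
  induction k with
  | zero => simp [pvBuild, pvOk]
  | succ k ih => simp [pvBuild, pvOk, ih, pvTop_build]

lemma pvLeaves_build (k : Nat) : pvLeaves (pvBuild k) = List.replicate (2 ^ k) (-(2 ^ 62) : Int) := by
  induction k with
  | zero => simp [pvBuild, pvLeaves]
  | succ k ih =>
    simp only [pvBuild, pvLeaves, ih]
    rw [← List.replicate_add]
    congr 1
    rw [pow_succ]
    ring

lemma pvQuery_eq : ∀ (t : PVSeg) (k : Nat), pvOk k t → ∀ (req : Int),
    pvQuery t k req = (pvLeaves t).findIdx? (fun x => req ≤ x) := by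
  intro t
  induction t with
  | leaf v =>
    intro k _ req
    simp only [pvQuery, pvLeaves, List.findIdx?_cons, List.findIdx?_nil]
    by_cases h : req ≤ v <;> simp [h]
  | node m l r ihl ihr =>
    intro k h req
    cases k with
    | zero => exact absurd h (by simp [pvOk])
    | succ k =>
      simp only [pvOk] at h
      obtain ⟨hl, hr, hm⟩ := h
      simp only [pvQuery, Nat.add_sub_cancel, pvLeaves, List.findIdx?_append,
        pvOk_leaves_length l k hl]
      by_cases hq : req ≤ pvTop l
      · rw [if_pos hq, ihl k hl req]
        cases hfl : (pvLeaves l).findIdx? (fun x => req ≤ x) with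
        | some j => simp
        | none =>
          exfalso
          have := List.findIdx?_eq_none_iff.mp hfl (pvTop l) (pvOk_top_mem l k hl)
          simp [hq] at this
      · rw [if_neg hq, ihr k hr req]
        have hfl : (pvLeaves l).findIdx? (fun x => req ≤ x) = none := by
          rw [List.findIdx?_eq_none_iff]
          intro x hx
          have hle := pvOk_le_top l k hl x hx
          simp only [decide_eq_false_iff_not]
          omega
        simp [hfl]

lemma pvUpdate_spec : ∀ (t : PVSeg) (k : Nat) (i : Nat) (v : Int), pvOk k t → i < 2 ^ k →
    pvOk k (pvUpdate t k i v) ∧ pvLeaves (pvUpdate t k i v) = (pvLeaves t).set i v := by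
  intro t
  induction t with
  | leaf w =>
    intro k i v h hi
    cases k with
    | zero =>
      have : i = 0 := by simpa using hi
      subst this
      exact ⟨trivial, by simp [pvUpdate, pvLeaves]⟩
    | succ k => exact absurd h (by simp [pvOk])
  | node m l r ihl ihr =>
    intro k i v h hi
    cases k with
    | zero => exact absurd h (by simp [pvOk])
    | succ k =>
      simp only [pvOk] at h
      obtain ⟨hl, hr, hm⟩ := h
      have hlen : (pvLeaves l).length = 2 ^ k := pvOk_leaves_length l k hl
      by_cases hcase : i < 2 ^ k
      · obtain ⟨hok', hlv'⟩ := ihl k i v hl hcase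
        simp only [pvUpdate, Nat.add_sub_cancel, if_pos hcase]
        refine ⟨⟨hok', hr, rfl⟩, ?_⟩
        simp only [pvLeaves, hlv', List.set_append, hlen, if_pos hcase]
      · have hi2 : i - 2 ^ k < 2 ^ k := by
          have : (2:Nat) ^ (k+1) = 2 ^ k + 2 ^ k := by rw [pow_succ]; ring
          omega
        obtain ⟨hok', hlv'⟩ := ihr k (i - 2 ^ k) v hr hi2
        simp only [pvUpdate, Nat.add_sub_cancel, if_neg hcase]
        refine ⟨⟨hl, hok', rfl⟩, ?_⟩
        simp only [pvLeaves, hlv', List.set_append, hlen, if_neg hcase]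

lemma pvKAux_ge (n k : Nat) : n ≤ 2 ^ (pvKAux n k) := by
  fun_induction pvKAux n k with
  | case1 k h ih => exact ih
  | case2 k h => omega

-- ===== phase 2: the segment-tree first-fit computes A's first-fit =====

lemma pvReplicate_set_zero (m : Nat) (hm : 0 < m) (v x : Int) :
    (List.replicate m x).set 0 v = v :: List.replicate (m - 1) x := by
  cases m with
  | zero => omega
  | succ m => simp [List.replicate_succ]

lemma pvSet_map_sub (usage : List Int) (j : Nat) (r maxr : Int) (hj : j < usage.length) :
    (usage.map (fun u => maxr - u)).set j (maxr - usage[j] - r) =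
      (pvUpdateAt usage j (· + r)).map (fun u => maxr - u) := by
  induction usage generalizing j with
  | nil => simp at hj
  | cons u us ih =>
    cases j with
    | zero =>
      simp [pvUpdateAt]
      ring
    | succ j =>
      simp only [List.map_cons, List.set_cons_succ, pvUpdateAt, List.getElem_cons_succ]
      rw [ih j (by simpa using hj)]

lemma phase2 (maxr : Int) (k : Nat) :
    ∀ (cs : List PVChunk) (tree : PVSeg) (usage : List Int) (bins : List (List PVChunk)) (assign : List Nat),
      (∀ c ∈ cs, 0 ≤ c.requests) →
      pvOk k tree →
      pvLeaves tree = usage.map (fun u => maxr - u) ++ List.replicate (2 ^ k - usage.length) (-(2 ^ 62) : Int) →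
      bins.length = usage.length →
      usage.length + cs.length ≤ 2 ^ k →
      ∃ js,
        (cs.foldl (pvFB maxr k) (tree, usage.map (fun u => maxr - u), assign)).2.2 = assign ++ js ∧
        (cs.foldl (pvFA maxr) (bins, usage)).1 = pvReplay (cs.zip js) bins := by
  intro cs
  induction cs with
  | nil =>
    intro tree usage bins assign _ _ _ _ _
    exact ⟨[], by simp, by simp [pvReplay]⟩
  | cons c cs ih =>
    intro tree usage bins assign hreq hok hleaves hlen hcap
    have hr0 : 0 ≤ c.requests := hreq c (List.mem_cons_self)
    have husage : usage.length < 2 ^ k := by simp at hcap; omega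
    -- the query is exactly A's linear first-fit search
    have hq : pvQuery tree k c.requests = pvFindBin usage c.requests maxr := by
      rw [pvQuery_eq tree k hok, hleaves, List.findIdx?_append, pvFindBin_eq_findIdx]
      have hrep : (List.replicate (2 ^ k - usage.length) (-(2 ^ 62) : Int)).findIdx?
          (fun x => c.requests ≤ x) = none := by
        rw [List.findIdx?_replicate]
        simp only [ite_eq_right_iff]
        intro hpair
        exfalso
        have : c.requests ≤ -(2 ^ 62) := by simpa using hpair.2
        omega
      rw [hrep]
      simp
    simp only [List.foldl_cons]
    cases hf : pvFindBin usage c.requests maxr with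
    | none =>
      -- open a new bin at index usage.length
      have hgetD : ((usage.map (fun u => maxr - u)) ++ [maxr - c.requests]).getD
          (usage.map (fun u => maxr - u)).length 0 = maxr - c.requests := by
        rw [List.getD_eq_getElem?_getD, List.getElem?_concat_length]
        rfl
      have hstepB : pvFB maxr k (tree, usage.map (fun u => maxr - u), assign) c =
          (pvUpdate tree k usage.length (maxr - c.requests),
            (usage ++ [c.requests]).map (fun u => maxr - u), assign ++ [usage.length]) := by
        simp only [pvFB, hq, hf, hgetD]
        simp
      have hstepA : pvFA maxr (bins, usage) c = (bins ++ [[c]], usage ++ [c.requests]) := by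
        simp [pvFA, hf]
      rw [hstepA, hstepB]
      obtain ⟨hok', hleaves'⟩ := pvUpdate_spec tree k usage.length (maxr - c.requests) hok husage
      have hleaves'' : pvLeaves (pvUpdate tree k usage.length (maxr - c.requests)) =
          (usage ++ [c.requests]).map (fun u => maxr - u) ++
            List.replicate (2 ^ k - (usage ++ [c.requests]).length) (-(2 ^ 62) : Int) := by
        rw [hleaves', hleaves, List.set_append]
        rw [if_neg (by simp)]
        simp only [List.length_map, Nat.sub_self]
        rw [pvReplicate_set_zero _ (by omega)]
        simp
        omega
      obtain ⟨js, h1, h2⟩ := ih (pvUpdate tree k usage.length (maxr - c.requests))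
        (usage ++ [c.requests]) (bins ++ [[c]]) (assign ++ [usage.length])
        (fun x hx => hreq x (List.mem_cons_of_mem c hx)) hok' hleaves''
        (by simp [hlen]) (by simp at hcap ⊢; omega)
      refine ⟨usage.length :: js, ?_, ?_⟩
      · rw [h1]; simp
      · rw [h2]
        simp only [List.zip_cons_cons, pvReplay]
        rw [if_pos hlen.symm]
    | some j =>
      have hj : j < usage.length := pvFindBin_some_lt usage c.requests maxr j hf
      have hgetD : (usage.map (fun u => maxr - u)).getD j 0 = maxr - usage[j] := by
        rw [List.getD_eq_getElem?_getD, List.getElem?_eq_getElem (by simpa using hj)]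
        simp
      have hset : (usage.map (fun u => maxr - u)).set j ((usage.map (fun u => maxr - u)).getD j 0 - c.requests) =
          (pvUpdateAt usage j (· + c.requests)).map (fun u => maxr - u) := by
        rw [hgetD]
        exact pvSet_map_sub usage j c.requests maxr hj
      have hgetD2 : ((pvUpdateAt usage j (· + c.requests)).map (fun u => maxr - u)).getD j 0 =
          maxr - usage[j] - c.requests := by
        rw [← pvSet_map_sub usage j c.requests maxr hj, List.getD_eq_getElem?_getD,
          List.getElem?_set_self (by simpa using hj)]
        rfl
      have hstepB : pvFB maxr k (tree, usage.map (fun u => maxr - u), assign) c =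
          (pvUpdate tree k j (maxr - usage[j] - c.requests),
            (pvUpdateAt usage j (· + c.requests)).map (fun u => maxr - u), assign ++ [j]) := by
        simp only [pvFB, hq, hf, hset, hgetD2]
      have hstepA : pvFA maxr (bins, usage) c =
          (pvUpdateAt bins j (· ++ [c]), pvUpdateAt usage j (· + c.requests)) := by
        simp [pvFA, hf]
      rw [hstepA, hstepB]
      obtain ⟨hok', hleaves'⟩ := pvUpdate_spec tree k j (maxr - usage[j] - c.requests) hok (by omega)
      have hleaves'' : pvLeaves (pvUpdate tree k j (maxr - usage[j] - c.requests)) =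
          (pvUpdateAt usage j (· + c.requests)).map (fun u => maxr - u) ++
            List.replicate (2 ^ k - (pvUpdateAt usage j (· + c.requests)).length) (-(2 ^ 62) : Int) := by
        rw [hleaves', hleaves, List.set_append, if_pos (by simpa using hj), pvUpdateAt_length]
        congr 1
        rw [hgetD] at hset
        exact hset
      obtain ⟨js, h1, h2⟩ := ih (pvUpdate tree k j (maxr - usage[j] - c.requests))
        (pvUpdateAt usage j (· + c.requests)) (pvUpdateAt bins j (· ++ [c])) (assign ++ [j])
        (fun x hx => hreq x (List.mem_cons_of_mem c hx)) hok' hleaves''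
        (by rw [pvUpdateAt_length, pvUpdateAt_length, hlen])
        (by rw [pvUpdateAt_length]; simp at hcap ⊢; omega)
      refine ⟨j :: js, ?_, ?_⟩
      · rw [h1]; simp
      · rw [h2]
        simp only [List.zip_cons_cons, pvReplay]
        rw [if_neg (by omega)]

-- ===== phase 3: incremental grouping = per-bin grouping =====

lemma pvG_eq (groups : List (PySem.Dict String (List String × List String))) (c : PVChunk) (j : Nat) :
    pvG groups (c, j) =
      pvUpdateAt (if j = groups.length then groups ++ [PySem.Dict.empty] else groups) j
        (fun g => pvStepB3 g c) := rfl

lemma pvGroupB_append (bin : List PVChunk) (c : PVChunk) :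
    pvGroupB (bin ++ [c]) = pvStepB3 (pvGroupB bin) c := by
  simp [pvGroupB, List.foldl_append]

lemma phase3 :
    ∀ (ps : List (PVChunk × Nat)) (bins : List (List PVChunk)),
      ps.foldl pvG (bins.map pvGroupB) = (pvReplay ps bins).map pvGroupB := by
  intro ps
  induction ps with
  | nil => intro bins; simp [pvReplay]
  | cons cj ps ih =>
    intro bins
    obtain ⟨c, j⟩ := cj
    simp only [List.foldl_cons, pvReplay]
    by_cases hj : j = bins.length
    · have hstep : pvG (bins.map pvGroupB) (c, j) = (bins ++ [[c]]).map pvGroupB := by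
        rw [pvG_eq, if_pos (by simp [hj])]
        have h1 : pvUpdateAt (bins.map pvGroupB ++ [PySem.Dict.empty]) (bins.map pvGroupB).length
            (fun g => pvStepB3 g c) = bins.map pvGroupB ++ [pvStepB3 PySem.Dict.empty c] :=
          pvUpdateAt_append_length _ _ _
        rw [show j = (bins.map pvGroupB).length by simp [hj], h1]
        simp [pvGroupB]
      rw [hstep, if_pos hj, ih]
    · have hstep : pvG (bins.map pvGroupB) (c, j) = (pvUpdateAt bins j (· ++ [c])).map pvGroupB := by
        rw [pvG_eq, if_neg (by simpa using hj)]
        exact pvUpdateAt_map pvGroupB bins j _ _ (fun bin => (pvGroupB_append bin c).symm)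
      rw [hstep, if_neg hj, ih]

lemma pvConv_get? (d : PySem.Dict String (List String × List String)) (k : String) :
    (pvConv d).get? k = (d.get? k).map
      (fun v => PySem.Dict.mk [("metrics", v.1), ("snapshots", v.2)]) := by
  obtain ⟨items⟩ := d
  induction items with
  | nil => simp [pvConv, PySem.Dict.get?]
  | cons p rest ih =>
    obtain ⟨k0, v0⟩ := p
    simp only [pvConv, List.map_cons] at *
    rw [PySem.Dict.get?_mk_cons, PySem.Dict.get?_mk_cons]
    by_cases hk : (k0 == k) = true
    · simp [hk]
    · rw [if_neg hk, if_neg hk]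
      simpa [pvConv] using ih

lemma pvConv_contains (d : PySem.Dict String (List String × List String)) (k : String) :
    (pvConv d).contains k = d.contains k := by
  obtain ⟨items⟩ := d
  simp only [pvConv, PySem.Dict.contains_mk, List.any_map]
  rfl

lemma pvConv_insert (d : PySem.Dict String (List String × List String)) (k : String)
    (v : List String × List String) :
    PySem.Dict.insert (pvConv d) k (PySem.Dict.mk [("metrics", v.1), ("snapshots", v.2)]) =
      pvConv (d.insert k v) := by
  obtain ⟨items⟩ := d
  simp only [PySem.Dict.insert, pvConv_contains]
  by_cases hc : (PySem.Dict.mk items).contains k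
  · simp only [hc, if_pos, pvConv]
    congr 1
    simp only [List.map_map]
    apply List.map_congr_left
    intro p _
    by_cases hk : (p.1 == k) = true
    · simp [hk, Function.comp]
    · simp [hk, Function.comp]
  · simp [hc, pvConv]

lemma pvInnerStep (w : List String × List String) (ms ss : List String) :
    PySem.Dict.insert
      (PySem.Dict.modify (PySem.Dict.mk [("metrics", w.1), ("snapshots", w.2)]) "metrics" [] (· ++ ms))
      "snapshots" ss = PySem.Dict.mk [("metrics", w.1 ++ ms), ("snapshots", ss)] := by
  rfl

lemma stepA3_conv (d : PySem.Dict String (List String × List String)) (c : PVChunk) :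
    pvStepA3 (pvConv d) c = pvConv (pvStepB3 d c) := by
  simp only [pvStepA3, pvStepB3, PySem.Dict.getD, pvConv_get?]
  cases hd : d.get? c.plugin with
  | none =>
    simp only [Option.map_none, Option.getD_none]
    rw [show (PySem.Dict.mk [("metrics", ([] : List String)), ("snapshots", ([] : List String))]) =
          PySem.Dict.mk [("metrics", (([], []) : List String × List String).1),
            ("snapshots", (([], []) : List String × List String).2)] from rfl,
        pvInnerStep]
    simpa using pvConv_insert d c.plugin (c.metrics, c.snapshots)
  | some mv =>
    simp only [Option.map_some, Option.getD_some]
    rw [pvInnerStep]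
    exact pvConv_insert d c.plugin (mv.1 ++ c.metrics, c.snapshots)

lemma groupA_conv (bin : List PVChunk) : pvGroupA bin = pvConv (pvGroupB bin) := by
  suffices h : ∀ (bin : List PVChunk) (d : PySem.Dict String (List String × List String)),
      bin.foldl pvStepA3 (pvConv d) = pvConv (bin.foldl pvStepB3 d) by
    simpa [pvGroupA, pvGroupB] using h bin PySem.Dict.empty
  intro bin
  induction bin with
  | nil => intro d; rfl
  | cons c cs ih => intro d; simp only [List.foldl_cons, stepA3_conv, ih]

-- ===== phase 1: same chunk list, and all request counts are nonnegative =====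

lemma chunks_eq (psm : List (String × List String)) (mc : List (List (String × List String))) :
    pvChunksA psm mc = pvChunksB psm mc := by
  unfold pvChunksA pvChunksB
  apply List.foldl_ext
  intro acc entry _
  apply List.foldl_ext
  intro acc pm _
  cases hget : PySem.Dict.get? (PySem.Dict.mk psm) pm.1 with
  | none => rfl
  | some snaps =>
    dsimp only
    rw [PySem.List.foldl_append_singleton_eq_map
      (fun i => (⟨pm.1, snaps, PySem.List.slice pm.2 (some i) (some (i + 5)),
        estimate_hourly_requests (PySem.List.len snaps)
          (PySem.List.len (PySem.List.slice pm.2 (some i) (some (i + 5))))⟩ : PVChunk)),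
      PySem.List.foldl_append_singleton_eq_map
      (fun i => (⟨pm.1, snaps, PySem.List.slice pm.2 (some i) (some (i + 5)),
        12 * PySem.Int.floordiv (PySem.List.len snaps + 29) 30⟩ : PVChunk))]
    congr 1
    apply List.map_congr_left
    intro i hi
    obtain ⟨hi0, hiL, -⟩ := (PySem.List.mem_pyRange_iff_of_pos (by norm_num) i).mp hi
    have hlen : PySem.List.len pm.2 = (pm.2.length : Int) := by simp
    have hchunk : PySem.List.slice pm.2 (some i) (some (i + 5)) =
        List.take ((i + 5).toNat - i.toNat) (List.drop i.toNat pm.2) :=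
      PySem.List.slice_toNat pm.2 hi0 (by omega)
    have hclen : 1 ≤ (PySem.List.slice pm.2 (some i) (some (i + 5))).length ∧
        (PySem.List.slice pm.2 (some i) (some (i + 5))).length ≤ 5 := by
      rw [hchunk]
      rw [hlen] at hiL
      have h1 : i.toNat < pm.2.length := by omega
      have h2 : (i + 5).toNat - i.toNat = 5 := by omega
      rw [h2]
      constructor
      · simp [List.length_take, List.length_drop]
        omega
      · simp [List.length_take]
    have hfd : PySem.Int.floordiv
        (PySem.List.len (PySem.List.slice pm.2 (some i) (some (i + 5))) + 4) 5 = 1 := by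
      rw [PySem.Int.floordiv_eq_iff_of_pos (by norm_num)]
      have := hclen.1
      have := hclen.2
      simp only [PySem.List.len_eq]
      omega
    simp only [estimate_hourly_requests, hfd]
    congr 1
    ring

lemma chunksB_req_nonneg (psm : List (String × List String)) (mc : List (List (String × List String))) :
    ∀ c ∈ pvChunksB psm mc, 0 ≤ c.requests := by
  unfold pvChunksB
  suffices h : ∀ (mc : List (List (String × List String))) (acc : List PVChunk),
      (∀ c ∈ acc, 0 ≤ c.requests) →
      ∀ c ∈ mc.foldl (fun acc entry =>
        entry.foldl (fun acc pm =>
          match PySem.Dict.get? (PySem.Dict.mk psm) pm.1 with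
          | none => acc
          | some snaps =>
            let req := 12 * PySem.Int.floordiv (PySem.List.len snaps + 29) 30
            (PySem.List.pyRange 0 (PySem.List.len pm.2) 5).foldl (fun acc i =>
              acc ++ [⟨pm.1, snaps, PySem.List.slice pm.2 (some i) (some (i + 5)), req⟩]) acc) acc) acc,
        0 ≤ c.requests by
    exact h mc [] (by simp)
  intro mc
  induction mc with
  | nil => intro acc hacc; exact hacc
  | cons entry rest ihmc =>
    intro acc hacc
    simp only [List.foldl_cons]
    apply ihmc
    clear ihmc
    induction entry generalizing acc with
    | nil => exact hacc
    | cons pm pms ihpm =>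
      simp only [List.foldl_cons]
      apply ihpm
      cases hget : PySem.Dict.get? (PySem.Dict.mk psm) pm.1 with
      | none => simpa using hacc
      | some snaps =>
        dsimp only
        rw [PySem.List.foldl_append_singleton_eq_map
          (fun i => (⟨pm.1, snaps, PySem.List.slice pm.2 (some i) (some (i + 5)),
            12 * PySem.Int.floordiv (PySem.List.len snaps + 29) 30⟩ : PVChunk))]
        intro c hc
        rcases List.mem_append.mp hc with h | h
        · exact hacc c h
        · obtain ⟨i, -, rfl⟩ := List.mem_map.mp h
          have hfd : 0 ≤ PySem.Int.floordiv (PySem.List.len snaps + 29) 30 := by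
            rw [PySem.Int.floordiv_eq_ediv_of_pos (by norm_num)]
            apply Int.ediv_nonneg _ (by norm_num)
            simp only [PySem.List.len_eq]
            omega
          simpa using by omega

-- 'sorted(chunks, reverse=True)' on key req = 'sorted(chunks, key=-req)' (both stable)
lemma sort_eq (cs : List PVChunk) :
    PySem.List.sorted cs (fun c => c.requests) true =
      PySem.List.sorted cs (fun c => -c.requests) false := by
  rw [PySem.List.sorted_rev_eq_foldl_insertBy, PySem.List.sorted_eq_foldl_insertBy]
  congr 1
  funext acc x
  congr 1
  funext a b
  simp

lemma main_eq (psm : List (String × List String)) (mc : List (List (String × List String))) (maxr : Int) :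
    generate_integrations_group psm mc maxr = generate_integrations_group_alt psm mc maxr := by
  rw [portA_unfold, portB_unfold, chunks_eq, sort_eq]
  set cs := PySem.List.sorted (pvChunksB psm mc) (fun c => -c.requests) false with hcs
  set k := pvKAux cs.length 0 with hk
  have hreq : ∀ c ∈ cs, 0 ≤ c.requests := by
    intro c hc
    exact chunksB_req_nonneg psm mc c ((PySem.List.mem_sorted _ _ _ c).mp hc)
  have hcap : (0 : Nat) + cs.length ≤ 2 ^ k := by
    simpa using pvKAux_ge cs.length 0
  obtain ⟨js, hassign, hbins⟩ :=
    phase2 maxr k cs (pvBuild k) [] [] [] hreq (pvBuild_ok k)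
      (by simp [pvLeaves_build]) rfl hcap
  simp only [List.map_nil] at hassign hbins
  rw [hbins, hassign]
  simp only [List.nil_append]
  have h3 := phase3 (cs.zip js) []
  simp only [List.map_nil] at h3
  rw [h3]
  rw [PySem.List.foldl_append_singleton_eq_map
        (fun bin => (pvGroupA bin).items.map (fun p => (p.1, p.2.items)))]
  simp only [List.nil_append, List.map_map]
  apply List.map_congr_left
  intro bin _
  simp only [Function.comp]
  rw [groupA_conv]
  simp [pvConv, List.map_map, Function.comp]

-- ===== VERDICT (by name: the statement is the Claim_ definition above) =====
theorem generate_integrations_group_spec : Claim_equal_generate_integrations_group := by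
  intro psm mc maxr _
  exact main_eq psm mc maxr
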